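-- pv_equiv track=rewrite | github.com/shoutcape/laurea-python-2022-tikkurila | osa07-02_erikoismerkit/src/erikoismerkit.py | jaa_merkkeihin
-- ===== SOURCE A (Python) =====
-- import string
--
-- def jaa_merkkeihin(merkkijono: str):
--     osa1 = ""
--     osa2 = ""
--     osa3 = ""
--     for x in merkkijono:
--         if x in string.ascii_letters:
--             osa1 += x
--         elif x in string.punctuation:
--             osa2 += x
--         else:
--             osa3 += x
--
--     return (osa1, osa2, osa3)
-- ===== SOURCE B (Python) =====
-- def _on_kirjain(c: str) -> bool:
--     o = ord(c)
--     return 65 <= o <= 90 or 97 <= o <= 122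
--
-- def _on_valimerkki(c: str) -> bool:
--     o = ord(c)
--     return 33 <= o <= 126 and not _on_kirjain(c) and not 48 <= o <= 57
--
-- def jaa_merkkeihin(merkkijono: str):
--     osa1 = "".join(filter(_on_kirjain, merkkijono))
--     osa2 = "".join(filter(_on_valimerkki, merkkijono))
--     osa3 = "".join(c for c in merkkijono
--                    if not _on_kirjain(c) and not _on_valimerkki(c))
--     return (osa1, osa2, osa3)
-- ===== Notes on version B (the rewrite author's own statement) =====
-- stated objective: alternative
-- what changed: Replaces the single loop with if/elif/else over three growing strings and membership tests in the string-module constants by three independent filtered joins whose predicates classify each character arithmetically by its ASCII code ranges (letter = 65-90/97-122; punctuation = 33-126 minus letters and digits).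
import Mathlib
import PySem

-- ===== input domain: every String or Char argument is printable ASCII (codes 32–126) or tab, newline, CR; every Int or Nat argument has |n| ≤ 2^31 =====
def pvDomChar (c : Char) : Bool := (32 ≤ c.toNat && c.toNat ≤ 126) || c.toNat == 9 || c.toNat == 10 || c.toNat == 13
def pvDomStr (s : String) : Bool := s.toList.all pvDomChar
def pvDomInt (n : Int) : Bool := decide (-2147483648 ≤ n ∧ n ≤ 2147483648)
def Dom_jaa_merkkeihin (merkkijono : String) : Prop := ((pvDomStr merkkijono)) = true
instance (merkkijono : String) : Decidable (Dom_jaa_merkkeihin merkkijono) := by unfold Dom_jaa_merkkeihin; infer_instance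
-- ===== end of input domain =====

-- B replaces A's single loop (three growing strings, membership tests against the string-module
-- constants) by three independent filtered joins whose predicates classify each character by its
-- ASCII code ranges; same outputs, different decomposition ("alternative"), no speed claim.

-- ===== PORT A =====
-- string.ascii_letters / string.punctuation (exact constants from CPython's string module)
def pvAsciiLetters : List Char := ['a','b','c','d','e','f','g','h','i','j','k','l','m','n','o','p','q','r','s','t','u','v','w','x','y','z','A','B','C','D','E','F','G','H','I','J','K','L','M','N','O','P','Q','R','S','T','U','V','W','X','Y','Z']
def pvPunctuation : List Char := ['!','\"','#','$','%','&','\'','(',')','*','+',',','-','.','/',':',';','<','=','>','?','@','[','\\',']','^','_','`','{','|','}','~']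

-- one pass: if letter → osa1, elif punctuation → osa2, else → osa3
def jaaStep (acc : List Char × List Char × List Char) (x : Char) : List Char × List Char × List Char :=
  if pvAsciiLetters.contains x then (acc.1 ++ [x], acc.2.1, acc.2.2)
  else if pvPunctuation.contains x then (acc.1, acc.2.1 ++ [x], acc.2.2)
  else (acc.1, acc.2.1, acc.2.2 ++ [x])

def jaa_merkkeihin (merkkijono : String) : String × String × String :=
  let r := merkkijono.toList.foldl jaaStep ([], [], [])
  (String.ofList r.1, String.ofList r.2.1, String.ofList r.2.2)

-- ===== PORT B =====
-- character classes by ASCII code ranges (ord-based, like Source B's _on_kirjain / _on_valimerkki)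
def onKirjain (c : Char) : Bool :=
  (65 ≤ c.toNat && c.toNat ≤ 90) || (97 ≤ c.toNat && c.toNat ≤ 122)

def onValimerkki (c : Char) : Bool :=
  (33 ≤ c.toNat && c.toNat ≤ 126) && !onKirjain c && !(48 ≤ c.toNat && c.toNat ≤ 57)

-- three independent filtered joins
def jaa_merkkeihin_alt (merkkijono : String) : String × String × String :=
  (String.ofList (merkkijono.toList.filter onKirjain),
   String.ofList (merkkijono.toList.filter onValimerkki),
   String.ofList (merkkijono.toList.filter (fun c => !onKirjain c && !onValimerkki c)))

-- ===== PRECONDITION & SPEC =====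
def Spec_jaa_merkkeihin (merkkijono : String) (out : String × String × String) : Prop := out = jaa_merkkeihin_alt merkkijono
instance (merkkijono : String) (out : String × String × String) : Decidable (Spec_jaa_merkkeihin merkkijono out) := by unfold Spec_jaa_merkkeihin; infer_instance

-- ===== CLAIM (what is proved, stated in full; the proofs are below) =====
def Claim_equal_jaa_merkkeihin : Prop := ∀ (merkkijono : String), Dom_jaa_merkkeihin merkkijono → Spec_jaa_merkkeihin merkkijono (jaa_merkkeihin merkkijono)

-- ===== LEMMAS AND PROOFS =====
lemma contains_letters (c : Char) : pvAsciiLetters.contains c = onKirjain c := by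
  by_cases h : c ∈ pvAsciiLetters
  · fin_cases h <;> decide
  · have hk : onKirjain c = false := by
      by_contra hb
      have hb' : onKirjain c = true := by simpa using hb
      have hc : Char.ofNat c.toNat = c := Char.ofNat_toNat c
      unfold onKirjain at hb'
      simp only [Bool.or_eq_true, Bool.and_eq_true, decide_eq_true_eq] at hb'
      apply h
      rcases hb' with ⟨h1, h2⟩ | ⟨h1, h2⟩ <;>
        (interval_cases hn : c.toNat <;> (rw [← hc]; decide))
    simp [List.contains_eq_mem, h, hk]

lemma contains_punct (c : Char) : pvPunctuation.contains c = onValimerkki c := by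
  by_cases h : c ∈ pvPunctuation
  · fin_cases h <;> decide
  · have hk : onValimerkki c = false := by
      by_contra hb
      have hb' : onValimerkki c = true := by simpa using hb
      have hc : Char.ofNat c.toNat = c := Char.ofNat_toNat c
      unfold onValimerkki onKirjain at hb'
      simp only [Bool.and_eq_true, Bool.not_eq_true', Bool.or_eq_false_iff,
        Bool.and_eq_false_iff, decide_eq_true_eq, decide_eq_false_iff_not, not_le] at hb'
      obtain ⟨⟨⟨h1, h2⟩, h3, h4⟩, h5⟩ := hb'
      apply h
      interval_cases hn : c.toNat <;> first
        | (rw [← hc]; decide)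
        | omega
    simp [List.contains_eq_mem, h, hk]

lemma jaa_fold (l a b c : List Char) :
    l.foldl jaaStep (a, b, c) =
      (a ++ l.filter onKirjain,
       b ++ l.filter onValimerkki,
       c ++ l.filter (fun x => !onKirjain x && !onValimerkki x)) := by
  induction l generalizing a b c with
  | nil => simp
  | cons x xs ih =>
    simp only [List.foldl_cons, jaaStep, contains_letters, contains_punct, List.filter_cons]
    by_cases hL : onKirjain x = true
    · have hP : onValimerkki x = false := by
        unfold onValimerkki; simp [hL]
      simp [hL, hP, ih]
    · simp only [Bool.not_eq_true] at hL
      by_cases hP : onValimerkki x = true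
      · simp [hL, hP, ih]
      · simp only [Bool.not_eq_true] at hP
        simp [hL, hP, ih]

-- ===== VERDICT (by name: the statement is the Claim_ definition above) =====
theorem jaa_merkkeihin_spec : Claim_equal_jaa_merkkeihin := by
  intro s _
  unfold Spec_jaa_merkkeihin jaa_merkkeihin jaa_merkkeihin_alt
  simp [jaa_fold]
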